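-- pv_equiv track=rewrite | github.com/HimanshuLadva/Python-DSA | Leetcode/daily/202601/20260103.py | numOfWays
-- ===== SOURCE A (Python) =====
-- def numOfWays(n: int) -> int:
--     MOD = 10**9 + 7
--
--     # Base case for row 1
--     dpA, dpB = 6, 6
--
--     for _ in range(2, n + 1):
--         newA = (dpA * 3 + dpB * 2) % MOD
--         newB = (dpA * 2 + dpB * 2) % MOD
--         dpA, dpB = newA, newB
--
--     return (dpA + dpB) % MOD
-- ===== SOURCE B (Python) =====
-- def numOfWays(n: int) -> int:
--     MOD = 10**9 + 7
--
--     def mul(X, Y):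
--         a, b, c, d = X
--         e, f, g, h = Y
--         return ((a * e + b * g) % MOD, (a * f + b * h) % MOD,
--                 (c * e + d * g) % MOD, (c * f + d * h) % MOD)
--
--     def mpow(m, k):
--         if k == 0:
--             return (1, 0, 0, 1)
--         h = mpow(mul(m, m), k // 2)
--         return mul(m, h) if k % 2 == 1 else h
--
--     k = max(n - 1, 0)
--     pa, pb, pc, pd = mpow((3, 2, 2, 2), k)
--     va = (pa * 6 + pb * 6) % MOD
--     vb = (pc * 6 + pd * 6) % MOD
--     return (va + vb) % MOD
-- ===== Notes on version B (the rewrite author's own statement) =====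
-- stated objective: faster
-- what changed: Replaced the O(n) dp loop with binary matrix exponentiation of the 2x2 transition matrix [[3,2],[2,2]] modulo 1000000007, applied to the base vector (6,6).
import Mathlib
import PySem

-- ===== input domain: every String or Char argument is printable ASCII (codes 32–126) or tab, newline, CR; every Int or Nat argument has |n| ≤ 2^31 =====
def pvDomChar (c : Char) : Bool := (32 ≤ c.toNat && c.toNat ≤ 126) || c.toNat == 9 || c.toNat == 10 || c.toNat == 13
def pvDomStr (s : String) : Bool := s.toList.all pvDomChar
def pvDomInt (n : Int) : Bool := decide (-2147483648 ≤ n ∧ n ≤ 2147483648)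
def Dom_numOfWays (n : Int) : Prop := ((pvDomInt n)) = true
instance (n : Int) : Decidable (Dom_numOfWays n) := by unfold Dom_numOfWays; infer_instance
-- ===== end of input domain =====

-- B replaces A's O(n) dp loop by binary exponentiation of the 2x2 transition matrix modulo 1000000007 (O(log n)).

-- ===== PORT A =====
def numOfWays (n : Int) : Int :=
  let MOD : Int := 1000000007
  let s := (PySem.List.pyRange 2 (n + 1) 1).foldl
    (fun (st : Int × Int) _ =>
      (PySem.Int.mod (st.1 * 3 + st.2 * 2) MOD, PySem.Int.mod (st.1 * 2 + st.2 * 2) MOD))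
    (6, 6)
  PySem.Int.mod (s.1 + s.2) MOD

-- ===== PORT B =====
-- 2x2 matrix as (a, b, c, d) = ((a b) (c d)), entries reduced modulo bMOD after each product.
def bMOD : Int := 1000000007

def bMul (X Y : Int × Int × Int × Int) : Int × Int × Int × Int :=
  let (a, b, c, d) := X
  let (e, f, g, h) := Y
  (PySem.Int.mod (a * e + b * g) bMOD, PySem.Int.mod (a * f + b * h) bMOD,
   PySem.Int.mod (c * e + d * g) bMOD, PySem.Int.mod (c * f + d * h) bMOD)

-- Source B's mpow, recursion on k; the exponent k = max(n-1,0) is nonnegative, so it is carried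
-- as a Nat and Python's k // 2, k % 2 are Nat division/mod (exact on nonnegative ints).
def bPow (m : Int × Int × Int × Int) (k : Nat) : Int × Int × Int × Int :=
  if k = 0 then (1, 0, 0, 1)
  else
    let h := bPow (bMul m m) (k / 2)
    if k % 2 = 1 then bMul m h else h
decreasing_by exact Nat.div_lt_self (Nat.pos_of_ne_zero (by assumption)) (by norm_num)

def numOfWays_alt (n : Int) : Int :=
  let k : Nat := (n - 1).toNat   -- max(n - 1, 0)
  let P := bPow (3, 2, 2, 2) k   -- (pa, pb, pc, pd)
  let va := PySem.Int.mod (P.1 * 6 + P.2.1 * 6) bMOD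
  let vb := PySem.Int.mod (P.2.2.1 * 6 + P.2.2.2 * 6) bMOD
  PySem.Int.mod (va + vb) bMOD

-- ===== PRECONDITION & SPEC =====
def Spec_numOfWays (n : Int) (out : Int) : Prop := out = numOfWays_alt n
instance (n : Int) (out : Int) : Decidable (Spec_numOfWays n out) := by unfold Spec_numOfWays; infer_instance

-- ===== CLAIM (what is proved, stated in full; the proofs are below) =====
def Claim_equal_numOfWays : Prop := ∀ (n : Int), Dom_numOfWays n → Spec_numOfWays n (numOfWays n)

-- ===== LEMMAS AND PROOFS =====

-- Exact (unreduced) 2x2 integer matrix product and power, the mathematical reference object.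
def iMul (X Y : Int × Int × Int × Int) : Int × Int × Int × Int :=
  (X.1 * Y.1 + X.2.1 * Y.2.2.1, X.1 * Y.2.1 + X.2.1 * Y.2.2.2,
   X.2.2.1 * Y.1 + X.2.2.2 * Y.2.2.1, X.2.2.1 * Y.2.1 + X.2.2.2 * Y.2.2.2)

def iPow (m : Int × Int × Int × Int) : Nat → Int × Int × Int × Int
  | 0 => (1, 0, 0, 1)
  | k + 1 => iMul m (iPow m k)

-- the exact integer dp pair: (X_j, Y_j) with X_0 = Y_0 = 6
def vecIter : Nat → Int × Int
  | 0 => (6, 6)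
  | j + 1 => (3 * (vecIter j).1 + 2 * (vecIter j).2, 2 * (vecIter j).1 + 2 * (vecIter j).2)

def mapMod (X : Int × Int × Int × Int) : Int × Int × Int × Int :=
  (X.1 % bMOD, X.2.1 % bMOD, X.2.2.1 % bMOD, X.2.2.2 % bMOD)

theorem bMOD_pos : (0 : Int) < bMOD := by norm_num [bMOD]

theorem pymod_eq (a : Int) : PySem.Int.mod a bMOD = a % bMOD :=
  PySem.Int.mod_eq_emod_of_pos bMOD_pos

-- reduction of a bilinear combination: reduce the four factors first or not, same residue
theorem modlin (a a' b b' c c' d d' : Int)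
    (ha : a % bMOD = a' % bMOD) (hb : b % bMOD = b' % bMOD)
    (hc : c % bMOD = c' % bMOD) (hd : d % bMOD = d' % bMOD) :
    (a * c + b * d) % bMOD = (a' * c' + b' * d') % bMOD :=
  Int.ModEq.add (Int.ModEq.mul ha hc) (Int.ModEq.mul hb hd)

theorem emod_emod (a : Int) : a % bMOD % bMOD = a % bMOD :=
  Int.emod_emod_of_dvd a dvd_rfl

theorem redlin (x y c d : Int) :
    ((x % bMOD) * c + (y % bMOD) * d) % bMOD = (x * c + y * d) % bMOD :=
  modlin _ _ _ _ _ _ _ _ (emod_emod x) (emod_emod y) rfl rfl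

theorem bMul_mapMod (X Y : Int × Int × Int × Int) :
    bMul (mapMod X) (mapMod Y) = mapMod (iMul X Y) := by
  obtain ⟨a, b, c, d⟩ := X; obtain ⟨e, f, g, h⟩ := Y
  simp only [bMul, iMul, mapMod, pymod_eq]
  refine Prod.ext ?_ (Prod.ext ?_ (Prod.ext ?_ ?_)) <;>
    exact modlin _ _ _ _ _ _ _ _ (emod_emod _) (emod_emod _) (emod_emod _) (emod_emod _)

theorem iMul_assoc (X Y Z : Int × Int × Int × Int) :
    iMul (iMul X Y) Z = iMul X (iMul Y Z) := by
  obtain ⟨a, b, c, d⟩ := X; obtain ⟨e, f, g, h⟩ := Y; obtain ⟨i, j, k, l⟩ := Z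
  simp only [iMul]
  refine Prod.ext ?_ (Prod.ext ?_ (Prod.ext ?_ ?_)) <;> ring

theorem iPow_double (m : Int × Int × Int × Int) (j : Nat) :
    iPow (iMul m m) j = iPow m (2 * j) := by
  induction j with
  | zero => rfl
  | succ j ih =>
      have : 2 * (j + 1) = (2 * j + 1) + 1 := by omega
      rw [this]
      simp only [iPow, ih, ← iMul_assoc]

theorem bPow_eq (m : Int × Int × Int × Int) (k : Nat) :
    bPow (mapMod m) k = mapMod (iPow m k) := by
  induction k using Nat.strong_induction_on generalizing m with
  | _ k ih =>
    rw [bPow]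
    by_cases hk : k = 0
    · subst hk; simp [iPow, mapMod, bMOD]
    · simp only [hk, if_false]
      have hlt : k / 2 < k := Nat.div_lt_self (Nat.pos_of_ne_zero hk) (by norm_num)
      rw [bMul_mapMod m m, ih (k / 2) hlt (iMul m m), iPow_double]
      by_cases hpar : k % 2 = 1
      · have hkk : k = 2 * (k / 2) + 1 := by omega
        simp only [hpar, if_true, bMul_mapMod]
        have : iMul m (iPow m (2 * (k / 2))) = iPow m (2 * (k / 2) + 1) := rfl
        rw [this, ← hkk]
      · have hkk : k = 2 * (k / 2) := by omega
        simp only [hpar, if_false]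
        rw [← hkk]

-- iPow applied to the start vector (6,6) is the exact dp pair
theorem apply_iMul (P Q : Int × Int × Int × Int) (v : Int × Int) :
    ((iMul P Q).1 * v.1 + (iMul P Q).2.1 * v.2,
     (iMul P Q).2.2.1 * v.1 + (iMul P Q).2.2.2 * v.2)
    = (P.1 * (Q.1 * v.1 + Q.2.1 * v.2) + P.2.1 * (Q.2.2.1 * v.1 + Q.2.2.2 * v.2),
       P.2.2.1 * (Q.1 * v.1 + Q.2.1 * v.2) + P.2.2.2 * (Q.2.2.1 * v.1 + Q.2.2.2 * v.2)) := by
  obtain ⟨a, b, c, d⟩ := P; obtain ⟨e, f, g, h⟩ := Q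
  simp only [iMul]
  exact Prod.ext (by ring) (by ring)

theorem iPow_apply (k : Nat) :
    ((iPow (3, 2, 2, 2) k).1 * 6 + (iPow (3, 2, 2, 2) k).2.1 * 6,
     (iPow (3, 2, 2, 2) k).2.2.1 * 6 + (iPow (3, 2, 2, 2) k).2.2.2 * 6) = vecIter k := by
  induction k with
  | zero => simp [iPow, vecIter]
  | succ k ih =>
      have h := apply_iMul (3, 2, 2, 2) (iPow (3, 2, 2, 2) k) (6, 6)
      simp only [iPow]
      rw [h, vecIter]
      rw [Prod.ext_iff] at ih
      simp only at ih
      rw [ih.1, ih.2]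

-- A's fold ignores the range elements: it is j-fold iteration of the mod step
def stepMod (st : Int × Int) : Int × Int :=
  ((st.1 * 3 + st.2 * 2) % bMOD, (st.1 * 2 + st.2 * 2) % bMOD)

theorem foldl_const_iterate (l : List Int) (s : Int × Int) :
    l.foldl (fun st _ => stepMod st) s = stepMod^[l.length] s := by
  induction l generalizing s with
  | nil => rfl
  | cons x xs ih => simp [List.foldl, ih, Function.iterate_succ_apply]

-- A's pair after j steps is the exact pair reduced mod bMOD
theorem iterate_eq_vecIter (j : Nat) :
    stepMod^[j] (6, 6) = ((vecIter j).1 % bMOD, (vecIter j).2 % bMOD) := by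
  induction j with
  | zero => simp [vecIter, bMOD]
  | succ j ih =>
      rw [Function.iterate_succ_apply', ih, vecIter]
      simp only [stepMod]
      refine Prod.ext ?_ ?_
      · show ((vecIter j).1 % bMOD * 3 + (vecIter j).2 % bMOD * 2) % bMOD = _
        rw [redlin]; congr 1; ring
      · show ((vecIter j).1 % bMOD * 2 + (vecIter j).2 % bMOD * 2) % bMOD = _
        rw [redlin]; congr 1; ring

-- ===== VERDICT (by name: the statement is the Claim_ definition above) =====
theorem numOfWays_spec : Claim_equal_numOfWays := by
  intro n _
  show numOfWays n = numOfWays_alt n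
  have hlit : (1000000007 : Int) = bMOD := rfl
  have hM : mapMod (3, 2, 2, 2) = (3, 2, 2, 2) := by decide
  set k : Nat := (n - 1).toNat with hk
  have hlen : (PySem.List.pyRange 2 (n + 1) 1).length = k := by
    rw [PySem.List.length_pyRange_one]; omega
  have hpow : bPow (3, 2, 2, 2) k = mapMod (iPow (3, 2, 2, 2) k) := by
    conv_lhs => rw [← hM]
    exact bPow_eq _ _
  have hv := iPow_apply k
  rw [Prod.ext_iff] at hv
  simp only at hv
  have hA : numOfWays n = ((vecIter k).1 % bMOD + (vecIter k).2 % bMOD) % bMOD := by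
    simp only [numOfWays, hlit]
    have hfun : (fun (st : Int × Int) (_ : Int) =>
        (PySem.Int.mod (st.1 * 3 + st.2 * 2) bMOD,
         PySem.Int.mod (st.1 * 2 + st.2 * 2) bMOD)) =
        fun (st : Int × Int) (_ : Int) => stepMod st := by
      funext st x
      simp [stepMod, pymod_eq]
    rw [hfun, foldl_const_iterate, hlen, iterate_eq_vecIter, pymod_eq]
  have hB : numOfWays_alt n = ((vecIter k).1 % bMOD + (vecIter k).2 % bMOD) % bMOD := by
    simp only [numOfWays_alt, ← hk, hpow, pymod_eq, mapMod]
    rw [redlin, redlin, hv.1, hv.2]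
  rw [hA, hB]
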